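-- pv_equiv track=rewrite | github.com/qqliu/learning-triangles | PrefixBucket/helper.py | find_num_node_intersects
-- ===== SOURCE A (Python) =====
-- def find_num_node_intersects(edge_dict, neighbor_list):
--     count = 0
--     for i in range(len(neighbor_list)):
--         a = neighbor_list[i]
--         for j in range(i + 1, len(neighbor_list)):
--             b = neighbor_list[j]
--             if (a, b) in edge_dict or (b, a) in edge_dict:
--                 count+=1
--     return count
-- ===== SOURCE B (Python) =====
-- def find_num_node_intersects(edge_dict, neighbor_list):
--     cnt = {}
--     for x in neighbor_list:
--         cnt[x] = cnt.get(x, 0) + 1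
--     seen = set()
--     total = 0
--     for key in edge_dict:
--         u, v = key
--         e = (u, v) if u <= v else (v, u)
--         if e in seen:
--             continue
--         seen.add(e)
--         cu = cnt.get(u, 0)
--         if u == v:
--             total += cu * (cu - 1) // 2
--         else:
--             total += cu * cnt.get(v, 0)
--     return total
-- ===== Notes on version B (the rewrite author's own statement) =====
-- stated objective: faster
-- what changed: Instead of testing every position pair against the edge dict (O(n^2) pairs), B builds a value-count table of neighbor_list once and sums, over each distinct unordered edge {u,v}, count[u]*count[v] (or C(count[u],2) for u==v).
import Mathlib
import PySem

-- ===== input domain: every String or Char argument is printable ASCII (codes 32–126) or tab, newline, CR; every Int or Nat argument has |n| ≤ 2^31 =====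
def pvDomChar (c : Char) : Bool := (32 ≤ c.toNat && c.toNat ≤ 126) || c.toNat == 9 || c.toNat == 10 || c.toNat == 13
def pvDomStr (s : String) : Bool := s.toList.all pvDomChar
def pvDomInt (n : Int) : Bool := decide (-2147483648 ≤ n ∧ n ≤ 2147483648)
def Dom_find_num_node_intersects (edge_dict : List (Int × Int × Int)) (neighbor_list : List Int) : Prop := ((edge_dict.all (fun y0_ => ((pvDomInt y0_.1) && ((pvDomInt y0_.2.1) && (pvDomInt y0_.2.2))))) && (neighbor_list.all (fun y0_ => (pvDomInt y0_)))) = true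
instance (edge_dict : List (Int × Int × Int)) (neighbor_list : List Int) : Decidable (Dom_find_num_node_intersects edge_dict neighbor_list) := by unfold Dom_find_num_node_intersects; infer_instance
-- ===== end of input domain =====

-- B replaces A's quadratic scan over all position pairs by a value-count table plus one
-- pass over the deduplicated unordered edges (objective: faster, asymptotic O(n+m) vs O(n^2)).


-- ===== PORT A =====
-- '(a, b) in edge_dict or (b, a) in edge_dict' — key membership in the dict
def pvMem (edge_dict : List (Int × Int × Int)) (a b : Int) : Bool :=
  edge_dict.any (fun p => p.1 == a && p.2.1 == b) || edge_dict.any (fun p => p.1 == b && p.2.1 == a)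

-- inner loop: 'for j in range(i + 1, len(neighbor_list)): …' over the suffix after position i
def pvInnerA (edge_dict : List (Int × Int × Int)) (a : Int) : List Int → Int → Int
  | [], count => count
  | b :: rest, count => pvInnerA edge_dict a rest (if pvMem edge_dict a b then count + 1 else count)

-- outer loop: 'for i in range(len(neighbor_list)): …'
def pvOuterA (edge_dict : List (Int × Int × Int)) : List Int → Int → Int
  | [], count => count
  | a :: rest, count => pvOuterA edge_dict rest (pvInnerA edge_dict a rest count)

def find_num_node_intersects (edge_dict : List (Int × Int × Int)) (neighbor_list : List Int) : Int :=
  pvOuterA edge_dict neighbor_list 0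

-- ===== PORT B =====
def pvNorm (u v : Int) : Int × Int := if u ≤ v then (u, v) else (v, u)

def find_num_node_intersects_alt (edge_dict : List (Int × Int × Int)) (neighbor_list : List Int) : Int :=
  -- cnt[x] = cnt.get(x, 0) + 1
  let cnt : PySem.Dict Int Int :=
    neighbor_list.foldl (fun d x => d.insert x (d.getD x 0 + 1)) PySem.Dict.empty
  -- one pass over edge_dict keys, deduplicating normalized edges with a set
  let res : PySem.Set (Int × Int) × Int :=
    edge_dict.foldl (fun st p =>
      let u := p.1
      let v := p.2.1
      let e := pvNorm u v
      if PySem.Set.contains st.1 e then st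
      else
        let seen' := PySem.Set.add st.1 e
        let cu := cnt.getD u 0
        if u = v then (seen', st.2 + PySem.Int.floordiv (cu * (cu - 1)) 2)
        else (seen', st.2 + cu * cnt.getD v 0)) (PySem.Set.empty, 0)
  res.2

-- ===== PRECONDITION & SPEC =====
def Spec_find_num_node_intersects (edge_dict : List (Int × Int × Int)) (neighbor_list : List Int) (out : Int) : Prop := out = find_num_node_intersects_alt edge_dict neighbor_list
instance (edge_dict : List (Int × Int × Int)) (neighbor_list : List Int) (out : Int) : Decidable (Spec_find_num_node_intersects edge_dict neighbor_list out) := by unfold Spec_find_num_node_intersects; infer_instance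

-- ===== CLAIM (what is proved, stated in full; the proofs are below) =====
def Claim_equal_find_num_node_intersects : Prop := ∀ (edge_dict : List (Int × Int × Int)) (neighbor_list : List Int), Dom_find_num_node_intersects edge_dict neighbor_list → Spec_find_num_node_intersects edge_dict neighbor_list (find_num_node_intersects edge_dict neighbor_list)

-- ===== LEMMAS AND PROOFS =====

-- the common mathematical value: number of position pairs i < j whose values form an edge
def pvS (edge_dict : List (Int × Int × Int)) : List Int → Int
  | [] => 0
  | a :: rest => (rest.countP (fun b => pvMem edge_dict a b) : Int) + pvS edge_dict rest

theorem pvInnerA_eq (ed : List (Int × Int × Int)) (a : Int) :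
    ∀ (t : List Int) (c : Int), pvInnerA ed a t c = c + (t.countP (fun b => pvMem ed a b) : Int) := by
  intro t
  induction t with
  | nil => intro c; simp [pvInnerA]
  | cons b t ih =>
    intro c
    simp only [pvInnerA, ih, List.countP_cons]
    by_cases h : pvMem ed a b = true <;> simp [h] <;> push_cast <;> ring

theorem pvOuterA_eq (ed : List (Int × Int × Int)) :
    ∀ (l : List Int) (c : Int), pvOuterA ed l c = c + pvS ed l := by
  intro l
  induction l with
  | nil => intro c; simp [pvOuterA, pvS]
  | cons a t ih =>
    intro c
    simp only [pvOuterA, ih, pvInnerA_eq, pvS]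
    ring

-- B-side proof machinery ------------------------------------------------------

def pvW (cnt : Int → Int) (e : Int × Int) : Int :=
  if e.1 = e.2 then PySem.Int.floordiv (cnt e.1 * (cnt e.1 - 1)) 2 else cnt e.1 * cnt e.2

theorem pvW_mk (c : Int → Int) (u v : Int) :
    pvW c (u, v) = if u = v then PySem.Int.floordiv (c u * (c u - 1)) 2 else c u * c v := rfl

def pvSumW (cnt : Int → Int) (L : List (Int × Int)) : Int := (L.map (pvW cnt)).sum

-- the list of distinct normalized edges B's 'seen' set lets through
def pvDedup (s : List (Int × Int)) : List (Int × Int × Int) → List (Int × Int)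
  | [] => []
  | p :: t =>
    if pvNorm p.1 p.2.1 ∈ s then pvDedup s t
    else pvNorm p.1 p.2.1 :: pvDedup (PySem.Set.add s (pvNorm p.1 p.2.1)) t

theorem pvNorm_fst_le (u v : Int) : (pvNorm u v).1 ≤ (pvNorm u v).2 := by
  unfold pvNorm; split_ifs with h <;> simp <;> omega

theorem pvNorm_eq_iff (a b : Int) (e : Int × Int) (he : e.1 ≤ e.2) :
    pvNorm a b = e ↔ (a = e.1 ∧ b = e.2) ∨ (a = e.2 ∧ b = e.1) := by
  obtain ⟨u, v⟩ := e
  simp only at he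
  unfold pvNorm
  split_ifs with h <;> simp only [Prod.mk.injEq] <;> constructor <;> intro hh <;> omega

theorem pvNorm_eq_pvNorm_iff (u v a b : Int) :
    pvNorm u v = pvNorm a b ↔ (u = a ∧ v = b) ∨ (u = b ∧ v = a) := by
  unfold pvNorm
  split_ifs <;> simp only [Prod.mk.injEq] <;> constructor <;> intro h <;> omega

theorem mem_pvDedup :
    ∀ (ed : List (Int × Int × Int)) (s : List (Int × Int)) (e : Int × Int),
      e ∈ pvDedup s ed ↔ e ∉ s ∧ ∃ p ∈ ed, pvNorm p.1 p.2.1 = e := by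
  intro ed
  induction ed with
  | nil => intro s e; simp [pvDedup]
  | cons p t ih =>
    intro s e
    by_cases hm : pvNorm p.1 p.2.1 ∈ s
    · rw [show pvDedup s (p :: t) = pvDedup s t from by simp only [pvDedup]; rw [if_pos hm]]
      rw [ih]
      simp only [List.mem_cons]
      constructor
      · rintro ⟨hns, q, hq, rfl⟩
        exact ⟨hns, q, Or.inr hq, rfl⟩
      · rintro ⟨hns, q, hq | hq, rfl⟩
        · subst hq; exact absurd hm hns
        · exact ⟨hns, q, hq, rfl⟩
    · rw [show pvDedup s (p :: t) =
          pvNorm p.1 p.2.1 :: pvDedup (PySem.Set.add s (pvNorm p.1 p.2.1)) t from by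
        simp only [pvDedup]; rw [if_neg hm]]
      simp only [List.mem_cons, ih, PySem.Set.mem_add]
      constructor
      · rintro (rfl | ⟨hne, q, hq, rfl⟩)
        · exact ⟨hm, p, Or.inl rfl, rfl⟩
        · exact ⟨fun h => hne (Or.inl h), q, Or.inr hq, rfl⟩
      · rintro ⟨hns, q, hq | hq, rfl⟩
        · subst hq; exact Or.inl rfl
        · by_cases he : pvNorm q.1 q.2.1 = pvNorm p.1 p.2.1
          · exact Or.inl he
          · exact Or.inr ⟨fun h => h.elim hns he, q, hq, rfl⟩

theorem nodup_pvDedup :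
    ∀ (ed : List (Int × Int × Int)) (s : List (Int × Int)), (pvDedup s ed).Nodup := by
  intro ed
  induction ed with
  | nil => intro s; simp [pvDedup]
  | cons p t ih =>
    intro s
    by_cases hm : pvNorm p.1 p.2.1 ∈ s
    · rw [show pvDedup s (p :: t) = pvDedup s t from by simp only [pvDedup]; rw [if_pos hm]]
      exact ih s
    · rw [show pvDedup s (p :: t) =
          pvNorm p.1 p.2.1 :: pvDedup (PySem.Set.add s (pvNorm p.1 p.2.1)) t from by
        simp only [pvDedup]; rw [if_neg hm]]
      refine List.nodup_cons.2 ⟨fun h => ?_, ih _⟩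
      exact ((mem_pvDedup t _ _).1 h).1 ((PySem.Set.mem_add _ _ _).2 (Or.inr rfl))

theorem normalized_pvDedup (ed : List (Int × Int × Int)) (s : List (Int × Int)) :
    ∀ e ∈ pvDedup s ed, e.1 ≤ e.2 := by
  intro e he
  obtain ⟨-, p, -, hpe⟩ := (mem_pvDedup ed s e).1 he
  simpa [hpe] using pvNorm_fst_le p.1 p.2.1

theorem pvW_pvNorm (c : Int → Int) (u v : Int) :
    pvW c (pvNorm u v) =
      if u = v then PySem.Int.floordiv (c u * (c u - 1)) 2 else c u * c v := by
  unfold pvNorm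
  by_cases hle : u ≤ v
  · rw [if_pos hle, pvW_mk]
  · rw [if_neg hle, pvW_mk]
    have huv : ¬ u = v := by omega
    have hvu : ¬ v = u := by omega
    rw [if_neg hvu, if_neg huv, mul_comm]

-- B's fold with a 'seen' set computes tot + the weight sum over the deduplicated edges
theorem pvFoldB (cnt : PySem.Dict Int Int) :
    ∀ (ed : List (Int × Int × Int)) (s : PySem.Set (Int × Int)) (tot : Int),
      (ed.foldl (fun st p =>
        let u := p.1
        let v := p.2.1
        let e := pvNorm u v
        if PySem.Set.contains st.1 e then st
        else
          let seen' := PySem.Set.add st.1 e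
          let cu := cnt.getD u 0
          if u = v then (seen', st.2 + PySem.Int.floordiv (cu * (cu - 1)) 2)
          else (seen', st.2 + cu * cnt.getD v 0)) (s, tot)).2
      = tot + pvSumW (fun x => cnt.getD x 0) (pvDedup s ed) := by
  intro ed
  induction ed with
  | nil => intro s tot; simp [pvDedup, pvSumW]
  | cons p t ih =>
    intro s tot
    simp only [List.foldl_cons]
    by_cases hm : pvNorm p.1 p.2.1 ∈ s
    · have hc : PySem.Set.contains s (pvNorm p.1 p.2.1) = true := (PySem.Set.contains_iff _ _).2 hm
      rw [show pvDedup s (p :: t) = pvDedup s t from by simp only [pvDedup]; rw [if_pos hm]]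
      simp only [hc, if_true]
      exact ih s tot
    · have hc : PySem.Set.contains s (pvNorm p.1 p.2.1) = false :=
        Bool.eq_false_iff.2 (fun h => hm ((PySem.Set.contains_iff _ _).1 h))
      rw [show pvDedup s (p :: t) =
          pvNorm p.1 p.2.1 :: pvDedup (PySem.Set.add s (pvNorm p.1 p.2.1)) t from by
        simp only [pvDedup]; rw [if_neg hm]]
      simp only [hc, Bool.false_eq_true, if_false]
      simp only [pvSumW, List.map_cons, List.sum_cons, pvW_pvNorm]
      by_cases huv : p.1 = p.2.1
      · rw [if_pos huv, if_pos huv, ih]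
        simp only [pvSumW]
        ring
      · rw [if_neg huv, if_neg huv, ih]
        simp only [pvSumW]
        ring

theorem pvFloordiv_zero : PySem.Int.floordiv 0 2 = 0 := by decide

theorem pvFloordiv_step (k : Int) :
    PySem.Int.floordiv (k * (k + 1)) 2 = PySem.Int.floordiv (k * (k - 1)) 2 + k := by
  obtain ⟨m, hm⟩ := Int.even_mul_succ_self (k - 1)
  have h1 : k * (k - 1) = m + m := by linear_combination hm
  have h2 : k * (k + 1) = m + m + 2 * k := by linear_combination hm
  rw [h1, h2, PySem.Int.floordiv_eq_ediv_of_pos (by norm_num),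
    PySem.Int.floordiv_eq_ediv_of_pos (by norm_num)]
  omega

theorem countP_or_disjoint (p q : Int → Bool) (h : ∀ x, ¬(p x = true ∧ q x = true)) :
    ∀ t : List Int, t.countP (fun x => p x || q x) = t.countP p + t.countP q := by
  intro t
  induction t with
  | nil => simp
  | cons b t ih =>
    simp only [List.countP_cons, ih]
    by_cases hp : p b = true
    · have hq : q b = false := Bool.eq_false_iff.2 (fun hq => h b ⟨hp, hq⟩)
      simp [hp, hq]; omega
    · have hp' : p b = false := Bool.eq_false_iff.2 hp
      by_cases hq : q b = true <;> simp [hp', hq, Bool.eq_false_iff.2] <;> omega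

theorem countP_eq_count (c : Int) (t : List Int) :
    t.countP (fun b => decide (b = c)) = t.count c := by
  induction t with
  | nil => simp
  | cons b t ih => by_cases h : b = c <;> simp [List.countP_cons, List.count_cons, ih, h]

-- weight change of one edge when one occurrence of `a` is prepended to the multiset
theorem pvKey (a : Int) (t : List Int) (u v : Int) (huv : u ≤ v) :
    pvW (fun x => (((a :: t).count x : Int))) (u, v) =
      (t.countP (fun b => decide (pvNorm a b = (u, v))) : Int) +
        pvW (fun x => ((t.count x : Int))) (u, v) := by
  have hca : (((a :: t).count a : Int)) = ((t.count a : Int)) + 1 := by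
    simp [List.count_cons]
  have hcx : ∀ x : Int, x ≠ a → (((a :: t).count x : Int)) = ((t.count x : Int)) := by
    intro x hx; simp [List.count_cons]; omega
  by_cases h1 : a = u <;> by_cases h2 : a = v
  · subst h1; subst h2
    have hpred : (fun b : Int => decide (pvNorm a b = (a, a))) = fun b => decide (b = a) := by
      funext b
      by_cases hb : b = a
      · simp [hb, pvNorm]
      · simp [pvNorm_eq_iff a b (a, a) le_rfl, hb]
    rw [hpred, countP_eq_count, pvW_mk, pvW_mk, if_pos rfl, if_pos rfl, hca]
    rw [show (((t.count a : Int)) + 1) * (((t.count a : Int)) + 1 - 1)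
        = ((t.count a : Int)) * (((t.count a : Int)) + 1) from by ring]
    rw [pvFloordiv_step]
    ring
  · subst h1
    have hvne : v ≠ a := fun h => h2 h.symm
    have hpred : (fun b : Int => decide (pvNorm a b = (a, v))) = fun b => decide (b = v) := by
      funext b
      by_cases hb : b = v
      · simp [hb, pvNorm, huv]
      · simp [pvNorm_eq_iff a b (a, v) huv, hb, h2]
    rw [hpred, countP_eq_count, pvW_mk, pvW_mk, if_neg h2, if_neg h2, hca, hcx v hvne]
    ring
  · subst h2
    have hune : u ≠ a := fun h => h1 h.symm
    have hpred : (fun b : Int => decide (pvNorm a b = (u, a))) = fun b => decide (b = u) := by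
      funext b
      by_cases hb : b = u
      · simp [hb, pvNorm, show ¬ a ≤ u by omega]
      · simp [pvNorm_eq_iff a b (u, a) huv, hb, h1]
    rw [hpred, countP_eq_count, pvW_mk, pvW_mk, if_neg hune, if_neg hune, hca, hcx u hune]
    ring
  · rw [show (fun b : Int => decide (pvNorm a b = (u, v))) = fun _ => false from
      funext fun b => by simp [pvNorm_eq_iff a b (u, v) huv, h1, h2]]
    rw [List.countP_false, pvW_mk, pvW_mk,
      hcx u (fun h => h1 h.symm), hcx v (fun h => h2 h.symm)]
    simp

-- incremental step: prepending a raises the weight sum by the number of elements of t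
-- that form an edge (in L) with a
theorem pvStep (a : Int) (t : List Int) :
    ∀ (L : List (Int × Int)), L.Nodup → (∀ e ∈ L, e.1 ≤ e.2) →
      pvSumW (fun x => (((a :: t).count x : Int))) L =
        (t.countP (fun b => decide (pvNorm a b ∈ L)) : Int) +
          pvSumW (fun x => ((t.count x : Int))) L := by
  intro L
  induction L with
  | nil => intro _ _; simp [pvSumW]
  | cons e L ih =>
    intro hnd hno
    obtain ⟨u, v⟩ := e
    have heL : (u, v) ∉ L := (List.nodup_cons.1 hnd).1
    have he12 : u ≤ v := hno (u, v) (List.mem_cons_self ..)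
    have hdisj : ∀ b : Int,
        ¬((decide (pvNorm a b = (u, v))) = true ∧ (decide (pvNorm a b ∈ L)) = true) := by
      intro b hb
      exact heL (by simpa [of_decide_eq_true hb.1] using of_decide_eq_true hb.2)
    have hsplit : t.countP (fun b => decide (pvNorm a b ∈ (u, v) :: L)) =
        t.countP (fun b => decide (pvNorm a b = (u, v))) +
          t.countP (fun b => decide (pvNorm a b ∈ L)) := by
      rw [show (fun b => decide (pvNorm a b ∈ (u, v) :: L)) =
          (fun b => decide (pvNorm a b = (u, v)) || decide (pvNorm a b ∈ L)) from
        funext fun b => by simp [List.mem_cons]]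
      exact countP_or_disjoint _ _ hdisj t
    have ihL := ih (List.nodup_cons.1 hnd).2 (fun x hx => hno x (List.mem_cons_of_mem _ hx))
    simp only [pvSumW, List.map_cons, List.sum_cons]
    simp only [pvSumW] at ihL
    rw [ihL, hsplit, pvKey a t u v he12]
    push_cast
    ring

-- the per-list-membership spec sum
def pvSL (L : List (Int × Int)) : List Int → Int
  | [] => 0
  | a :: t => (t.countP (fun b => decide (pvNorm a b ∈ L)) : Int) + pvSL L t

theorem pvSumW_zero (L : List (Int × Int)) :
    pvSumW (fun x => ((([] : List Int).count x : Int))) L = 0 := by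
  induction L with
  | nil => simp [pvSumW]
  | cons e L ih =>
    simp only [pvSumW, List.map_cons, List.sum_cons]
    simp only [pvSumW] at ih
    rw [ih]
    simp only [pvW, List.count_nil, Nat.cast_zero]
    split_ifs <;> simp [pvFloordiv_zero]

theorem pvSumW_eq_pvSL (L : List (Int × Int)) (hnd : L.Nodup) (hno : ∀ e ∈ L, e.1 ≤ e.2) :
    ∀ nl : List Int, pvSumW (fun x => ((nl.count x : Int))) L = pvSL L nl := by
  intro nl
  induction nl with
  | nil => simpa [pvSL] using pvSumW_zero L
  | cons a t ih => rw [pvStep a t L hnd hno, ih]; simp [pvSL]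

theorem pvMem_iff_mem_dedup (ed : List (Int × Int × Int)) (a b : Int) :
    pvMem ed a b = true ↔ pvNorm a b ∈ pvDedup [] ed := by
  rw [mem_pvDedup]
  simp only [List.not_mem_nil, not_false_iff, true_and]
  simp only [pvMem, Bool.or_eq_true, List.any_eq_true, Bool.and_eq_true, beq_iff_eq]
  constructor
  · rintro (⟨p, hp, hh1, hh2⟩ | ⟨p, hp, hh1, hh2⟩)
    · exact ⟨p, hp, (pvNorm_eq_pvNorm_iff ..).2 (Or.inl ⟨hh1, hh2⟩)⟩
    · exact ⟨p, hp, (pvNorm_eq_pvNorm_iff ..).2 (Or.inr ⟨hh1, hh2⟩)⟩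
  · rintro ⟨p, hp, hn⟩
    rcases (pvNorm_eq_pvNorm_iff ..).1 hn with ⟨hh1, hh2⟩ | ⟨hh1, hh2⟩
    · exact Or.inl ⟨p, hp, hh1, hh2⟩
    · exact Or.inr ⟨p, hp, hh1, hh2⟩

theorem pvSL_eq_pvS (ed : List (Int × Int × Int)) :
    ∀ nl : List Int, pvSL (pvDedup [] ed) nl = pvS ed nl := by
  intro nl
  induction nl with
  | nil => simp [pvSL, pvS]
  | cons a t ih =>
    simp only [pvSL, pvS, ih]
    congr 2
    apply List.countP_congr
    intro b _
    by_cases hb : pvMem ed a b = true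
    · simp [hb, (pvMem_iff_mem_dedup ed a b).1 hb]
    · have hnm : pvNorm a b ∉ pvDedup [] ed := fun h => hb ((pvMem_iff_mem_dedup ed a b).2 h)
      rw [Bool.eq_false_iff.2 hb]
      simp [hnm]

theorem altB_eq_pvS (ed : List (Int × Int × Int)) (nl : List Int) :
    find_num_node_intersects_alt ed nl = pvS ed nl := by
  unfold find_num_node_intersects_alt
  rw [pvFoldB, zero_add]
  rw [show (fun x => (nl.foldl (fun d x => d.insert x (d.getD x 0 + 1)) PySem.Dict.empty).getD x 0)
      = fun x : Int => ((nl.count x : Int)) from funext fun x => by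
    rw [PySem.Dict.getD_foldl_insert_add_one]; simp]
  exact (pvSumW_eq_pvSL _ (nodup_pvDedup ed _) (normalized_pvDedup ed _) nl).trans
    (pvSL_eq_pvS ed nl)

-- ===== VERDICT (by name: the statement is the Claim_ definition above) =====
theorem find_num_node_intersects_spec : Claim_equal_find_num_node_intersects := by
  intro ed nl _
  unfold Spec_find_num_node_intersects
  rw [altB_eq_pvS]
  unfold find_num_node_intersects
  rw [pvOuterA_eq]
  ring
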